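-- pv_equiv track=rewrite | github.com/lachiebol/meedya | subtitles.py | extract_subtitles
-- ===== SOURCE A (Python) =====
-- def extract_subtitles(file_array):
--     indexes = []
--     timestamps = []
--     subtitles = []
--     current_subtitle = []
--
--     for line in file_array:
--         line = line.strip()
--         if not line:
--             continue
--         if line.isdigit():
--             if current_subtitle:
--                 subtitles.append('/n'.join(current_subtitle))
--                 current_subtitle = []
--             indexes.append(int(line))
--         elif '-->' in line:
--             timestamps.append(line)
--         else:
--             current_subtitle.append(line)
--
--     if current_subtitle:
--         subtitles.append('/n'.join(current_subtitle))
--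
--     return indexes, timestamps, subtitles
-- ===== SOURCE B (Python) =====
-- def _flush(seg):
--     text = [x for x in seg if '-->' not in x]
--     return ['/n'.join(text)] if text else []
--
--
-- def _collect(lines):
--     # split the line stream at each digit line; each segment flushes separately
--     for i, l in enumerate(lines):
--         if l.isdigit():
--             return _flush(lines[:i]) + _collect(lines[i + 1:])
--     return _flush(lines)
--
--
-- def extract_subtitles(file_array):
--     stripped = [s for s in (l.strip() for l in file_array) if s]
--     indexes = [int(l) for l in stripped if l.isdigit()]
--     timestamps = [l for l in stripped if '-->' in l and not l.isdigit()]
--     return indexes, timestamps, _collect(stripped)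
-- ===== Notes on version B (the rewrite author's own statement) =====
-- stated objective: alternative
-- what changed: A's single pass with four mutable accumulators is replaced by three independent passes: a filter for indexes, a filter for timestamps, and a recursive split of the stripped line stream at digit lines for the subtitles.
import Mathlib
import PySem

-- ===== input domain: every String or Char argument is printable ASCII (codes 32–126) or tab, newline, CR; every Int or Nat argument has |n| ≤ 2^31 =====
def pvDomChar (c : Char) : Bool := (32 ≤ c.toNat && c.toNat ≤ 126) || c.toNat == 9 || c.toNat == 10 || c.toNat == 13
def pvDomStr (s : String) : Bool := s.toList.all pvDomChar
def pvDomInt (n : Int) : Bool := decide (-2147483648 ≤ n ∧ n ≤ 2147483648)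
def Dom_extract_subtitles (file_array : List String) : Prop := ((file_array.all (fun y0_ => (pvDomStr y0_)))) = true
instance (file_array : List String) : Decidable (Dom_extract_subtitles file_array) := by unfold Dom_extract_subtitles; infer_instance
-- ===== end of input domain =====

-- B replaces A's one-pass four-accumulator state machine by three separate passes
-- (two filters and a recursive split of the line stream at digit lines); objective: alternative decomposition, same cost.

-- ===== PORT A =====
-- state: (indexes, timestamps, subtitles, current_subtitle)
def pvStateA : Type := List Int × List String × List String × List String

-- the body of A's loop after `line = line.strip()` produced a NONEMPTY l
def pvStepA' (st : pvStateA) (l : String) : pvStateA :=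
  if PySem.Str.strIsdigit l then
    -- `if current_subtitle: subtitles.append('/n'.join(...)); current_subtitle = []`
    let (subtitles, cur) :=
      if st.2.2.2 ≠ [] then (st.2.2.1 ++ [PySem.Str.join "/n" st.2.2.2], ([] : List String))
      else (st.2.2.1, st.2.2.2)
    -- isdigit guarantees int(l) succeeds; `.getD 0` is unreachable
    (st.1 ++ [(PySem.Int.ofStr? l).getD 0], st.2.1, subtitles, cur)
  else if PySem.Str.isIn "-->" l then
    (st.1, st.2.1 ++ [l], st.2.2.1, st.2.2.2)
  else
    (st.1, st.2.1, st.2.2.1, st.2.2.2 ++ [l])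

def pvStepA (st : pvStateA) (line : String) : pvStateA :=
  let l := PySem.Str.strip line
  if l = "" then st else pvStepA' st l

def extract_subtitles (file_array : List String) : List Int × List String × List String :=
  let st := file_array.foldl pvStepA (([], [], [], []) : pvStateA)
  -- final `if current_subtitle: subtitles.append(...)`
  (st.1, st.2.1, if st.2.2.2 ≠ [] then st.2.2.1 ++ [PySem.Str.join "/n" st.2.2.2] else st.2.2.1)

-- ===== PORT B =====
def pvFlush (seg : List String) : List String :=
  let text := seg.filter (fun x => !PySem.Str.isIn "-->" x)
  if text = [] then [] else [PySem.Str.join "/n" text]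

-- split the line stream at the first digit line (Python B's enumerate search:
-- lines[:i] is the takeWhile prefix, lines[i+1:] the tail after the digit line)
def pvCollect (lines : List String) : List String :=
  match h : lines.dropWhile (fun l => !PySem.Str.strIsdigit l) with
  | [] => pvFlush lines
  | _ :: t =>
      pvFlush (lines.takeWhile (fun l => !PySem.Str.strIsdigit l)) ++ pvCollect t
termination_by lines.length
decreasing_by
  have hle := List.length_dropWhile_le (fun l => !PySem.Str.strIsdigit l) lines
  rw [h] at hle; simp at hle; omega

def extract_subtitles_alt (file_array : List String) : List Int × List String × List String :=
  let stripped := (file_array.map PySem.Str.strip).filter (fun s => s ≠ "")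
  let indexes := (stripped.filter (fun l => PySem.Str.strIsdigit l)).map
    (fun l => (PySem.Int.ofStr? l).getD 0)
  let timestamps := stripped.filter
    (fun l => PySem.Str.isIn "-->" l && !PySem.Str.strIsdigit l)
  (indexes, timestamps, pvCollect stripped)

-- ===== PRECONDITION & SPEC =====
def Spec_extract_subtitles (file_array : List String) (out : List Int × List String × List String) : Prop := out = extract_subtitles_alt file_array
instance (file_array : List String) (out : List Int × List String × List String) : Decidable (Spec_extract_subtitles file_array out) := by unfold Spec_extract_subtitles; infer_instance

-- ===== CLAIM (what is proved, stated in full; the proofs are below) =====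
def Claim_equal_extract_subtitles : Prop := ∀ (file_array : List String), Dom_extract_subtitles file_array → Spec_extract_subtitles file_array (extract_subtitles file_array)

-- ===== LEMMAS AND PROOFS =====

-- A's final flush, as a function (proof-side)
def pvFlushA (C : List String) : List String :=
  if C ≠ [] then [PySem.Str.join "/n" C] else []

-- proof-side recursion: A's subtitle accumulator, elementwise
def pvCollectAux (C : List String) : List String → List String
  | [] => pvFlushA C
  | l :: t =>
    if PySem.Str.strIsdigit l then pvFlushA C ++ pvCollectAux [] t
    else if PySem.Str.isIn "-->" l then pvCollectAux C t
    else pvCollectAux (C ++ [l]) t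

-- pvCollect with an already-filtered accumulated prefix C (non-recursive: calls pvCollect)
def pvCollect' (C : List String) (lines : List String) : List String :=
  match lines.dropWhile (fun l => !PySem.Str.strIsdigit l) with
  | [] => pvFlush (C ++ lines)
  | _ :: t =>
      pvFlush (C ++ lines.takeWhile (fun l => !PySem.Str.strIsdigit l)) ++ pvCollect t

theorem pvCollect'_drop_nil (C lines : List String)
    (h : lines.dropWhile (fun l => !PySem.Str.strIsdigit l) = []) :
    pvCollect' C lines = pvFlush (C ++ lines) := by
  unfold pvCollect'; rw [h]

theorem pvCollect'_drop_cons (C lines : List String) (x : String) (t : List String)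
    (h : lines.dropWhile (fun l => !PySem.Str.strIsdigit l) = x :: t) :
    pvCollect' C lines =
      pvFlush (C ++ lines.takeWhile (fun l => !PySem.Str.strIsdigit l)) ++ pvCollect t := by
  unfold pvCollect'; rw [h]

theorem pvCollect_eq_collect' (lines : List String) : pvCollect lines = pvCollect' [] lines := by
  unfold pvCollect pvCollect'
  cases h : lines.dropWhile (fun l => !PySem.Str.strIsdigit l) <;> simp

theorem pvFlush_filtered (C : List String)
    (hC : C.all (fun x => !PySem.Str.isIn "-->" x) = true) : pvFlush C = pvFlushA C := by
  have hf : C.filter (fun x => !PySem.Str.isIn "-->" x) = C :=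
    List.filter_eq_self.mpr (by simpa [List.all_eq_true] using hC)
  unfold pvFlush pvFlushA
  rw [hf]
  by_cases h : C = [] <;> simp [h]

theorem pvFlush_skip (C : List String) (l : String) (pre : List String)
    (hin : PySem.Str.isIn "-->" l = true) :
    pvFlush (C ++ l :: pre) = pvFlush (C ++ pre) := by
  have hinC : PySem.Chars.isIn ['-', '-', '>'] l.toList = true := by simpa using hin
  unfold pvFlush
  rw [show (C ++ l :: pre).filter (fun x => !PySem.Str.isIn "-->" x)
        = (C ++ pre).filter (fun x => !PySem.Str.isIn "-->" x) by
    simp [List.filter_append, List.filter_cons, hinC]]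

theorem pvFlush_keep (C : List String) (l : String) (pre : List String) :
    pvFlush (C ++ l :: pre) = pvFlush ((C ++ [l]) ++ pre) := by
  rw [List.append_assoc, List.singleton_append]

theorem pvCollectAux_eq (lines : List String) :
    ∀ C : List String, C.all (fun x => !PySem.Str.isIn "-->" x) = true →
      pvCollectAux C lines = pvCollect' C lines := by
  induction lines with
  | nil =>
    intro C hC
    rw [pvCollect'_drop_nil C [] (by simp), List.append_nil, pvFlush_filtered C hC]
    rfl
  | cons l t ih =>
    intro C hC
    by_cases hd : PySem.Str.strIsdigit l = true
    · have hdC : PySem.Chars.strIsdigit l.toList = true := by simpa using hd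
      have hdrop : (l :: t).dropWhile (fun l => !PySem.Str.strIsdigit l) = l :: t := by
        simp [List.dropWhile_cons, hdC]
      have htake : (l :: t).takeWhile (fun l => !PySem.Str.strIsdigit l) = [] := by
        simp [List.takeWhile_cons, hdC]
      rw [pvCollect'_drop_cons C (l :: t) l t hdrop, htake, List.append_nil,
        pvFlush_filtered C hC]
      have hL : pvCollectAux C (l :: t) = pvFlushA C ++ pvCollectAux [] t := by
        simp only [pvCollectAux]; simp [hdC]
      rw [hL, ih [] (by simp), pvCollect_eq_collect']
    · have hdC : PySem.Chars.strIsdigit l.toList = false := by simpa using hd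
      have hdrop : (l :: t).dropWhile (fun l => !PySem.Str.strIsdigit l)
          = t.dropWhile (fun l => !PySem.Str.strIsdigit l) := by
        simp [List.dropWhile_cons, hdC]
      have htake : (l :: t).takeWhile (fun l => !PySem.Str.strIsdigit l)
          = l :: t.takeWhile (fun l => !PySem.Str.strIsdigit l) := by
        simp [List.takeWhile_cons, hdC]
      by_cases hin : PySem.Str.isIn "-->" l = true
      · -- timestamp line: dropped by the flush filter on both sides
        have hinC : PySem.Chars.isIn ['-', '-', '>'] l.toList = true := by simpa using hin
        have hL : pvCollectAux C (l :: t) = pvCollectAux C t := by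
          simp only [pvCollectAux]; simp [hdC, hinC]
        rw [hL, ih C hC]
        cases h : t.dropWhile (fun l => !PySem.Str.strIsdigit l) with
        | nil =>
          rw [pvCollect'_drop_nil C t h, pvCollect'_drop_nil C (l :: t) (hdrop.trans h),
            pvFlush_skip C l t hin]
        | cons x t' =>
          rw [pvCollect'_drop_cons C t x t' h,
            pvCollect'_drop_cons C (l :: t) x t' (hdrop.trans h), htake,
            pvFlush_skip C l _ hin]
      · -- ordinary text line: accumulated
        have hinC : PySem.Chars.isIn ['-', '-', '>'] l.toList = false := by simpa using hin
        have hL : pvCollectAux C (l :: t) = pvCollectAux (C ++ [l]) t := by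
          simp only [pvCollectAux]; simp [hdC, hinC]
        have hC' : (C ++ [l]).all (fun x => !PySem.Str.isIn "-->" x) = true := by
          simp [List.all_eq_true] at hC ⊢; exact ⟨hC, hinC⟩
        rw [hL, ih (C ++ [l]) hC']
        cases h : t.dropWhile (fun l => !PySem.Str.strIsdigit l) with
        | nil =>
          rw [pvCollect'_drop_nil _ t h, pvCollect'_drop_nil C (l :: t) (hdrop.trans h),
            pvFlush_keep]
        | cons x t' =>
          rw [pvCollect'_drop_cons _ t x t' h,
            pvCollect'_drop_cons C (l :: t) x t' (hdrop.trans h), htake,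
            pvFlush_keep]

-- A's loop over the raw lines is the loop over the stripped nonempty lines
theorem foldA_strip (L : List String) : ∀ st : pvStateA,
    L.foldl pvStepA st = ((L.map PySem.Str.strip).filter (fun s => s ≠ "")).foldl pvStepA' st := by
  induction L with
  | nil => intro st; simp
  | cons l t ih =>
    intro st
    by_cases h : PySem.Str.strip l = ""
    · simp [pvStepA, h, ih]
    · simp [pvStepA, h, ih]

-- the main invariant of A's loop (stated on projections so `rw` applies)
theorem foldA'_inv (L : List String) : ∀ (I : List Int) (T S C : List String),
    ((L.foldl pvStepA' (I, T, S, C)).1,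
     (L.foldl pvStepA' (I, T, S, C)).2.1,
     if (L.foldl pvStepA' (I, T, S, C)).2.2.2 ≠ []
       then (L.foldl pvStepA' (I, T, S, C)).2.2.1
              ++ [PySem.Str.join "/n" (L.foldl pvStepA' (I, T, S, C)).2.2.2]
       else (L.foldl pvStepA' (I, T, S, C)).2.2.1) =
    (I ++ (L.filter (fun l => PySem.Str.strIsdigit l)).map (fun l => (PySem.Int.ofStr? l).getD 0),
     T ++ L.filter (fun l => PySem.Str.isIn "-->" l && !PySem.Str.strIsdigit l),
     S ++ pvCollectAux C L) := by
  induction L with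
  | nil =>
    intro I T S C
    by_cases h : C = [] <;> simp [pvCollectAux, pvFlushA, h]
  | cons l t ih =>
    intro I T S C
    by_cases hd : PySem.Str.strIsdigit l = true
    · have hdC : PySem.Chars.strIsdigit l.toList = true := by simpa using hd
      by_cases hC : C = []
      · have hstep : pvStepA' (I, T, S, C) l = (I ++ [(PySem.Int.ofStr? l).getD 0], T, S, C) := by
          simp [pvStepA', hdC, hC]
        simp only [List.foldl_cons, hstep]
        rw [ih]
        simp [pvCollectAux, pvFlushA, hdC, hC, List.filter_cons]
      · have hstep : pvStepA' (I, T, S, C) l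
            = (I ++ [(PySem.Int.ofStr? l).getD 0], T, S ++ [PySem.Str.join "/n" C],
               ([] : List String)) := by
          simp [pvStepA', hdC, hC]
        simp only [List.foldl_cons, hstep]
        rw [ih]
        simp [pvCollectAux, pvFlushA, hdC, hC, List.filter_cons]
    · have hdC : PySem.Chars.strIsdigit l.toList = false := by simpa using hd
      by_cases hin : PySem.Str.isIn "-->" l = true
      · have hinC : PySem.Chars.isIn ['-', '-', '>'] l.toList = true := by simpa using hin
        have hstep : pvStepA' (I, T, S, C) l = (I, T ++ [l], S, C) := by
          simp [pvStepA', hdC, hinC]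
        simp only [List.foldl_cons, hstep]
        rw [ih]
        simp [pvCollectAux, hdC, hinC, List.filter_cons]
      · have hinC : PySem.Chars.isIn ['-', '-', '>'] l.toList = false := by simpa using hin
        have hstep : pvStepA' (I, T, S, C) l = (I, T, S, C ++ [l]) := by
          simp [pvStepA', hdC, hinC]
        simp only [List.foldl_cons, hstep]
        rw [ih]
        simp [pvCollectAux, hdC, hinC, List.filter_cons]

-- ===== VERDICT (by name: the statement is the Claim_ definition above) =====
theorem extract_subtitles_spec : Claim_equal_extract_subtitles := by
  intro file_array _
  show extract_subtitles file_array = extract_subtitles_alt file_array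
  simp only [extract_subtitles, extract_subtitles_alt]
  rw [foldA_strip]
  rw [foldA'_inv ((file_array.map PySem.Str.strip).filter (fun s => s ≠ "")) [] [] [] []]
  simp only [List.nil_append]
  rw [pvCollect_eq_collect', ← pvCollectAux_eq _ [] (by simp)]
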